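-- pv_equiv track=rewrite | github.com/gems-uff/combination_conflicts_analysis | v1_v2_percentage.py | get_missing_lines_amount
-- ===== SOURCE A (Python) =====
-- def get_missing_lines_amount(chunk_side, resolution):
--     missing_lines_number = 0
--     resolution = resolution.copy()
--     for line in chunk_side:
--         if line not in resolution:
--             missing_lines_number+=1
--         else:
--             resolution.remove(line)
--     return missing_lines_number
-- ===== SOURCE B (Python) =====
-- def get_missing_lines_amount(chunk_side, resolution):
--     freq_c = {}
--     for line in chunk_side:
--         freq_c[line] = freq_c.get(line, 0) + 1
--     freq_r = {}
--     for line in resolution: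
--         freq_r[line] = freq_r.get(line, 0) + 1
--     return sum(max(count - freq_r.get(line, 0), 0)
--                for line, count in freq_c.items())
-- ===== Notes on version B (the rewrite author's own statement) =====
-- stated objective: faster
-- what changed: Replaces A's per-line membership-test-and-consume loop over a mutating copy of resolution with two frequency dictionaries built in one pass each, returning the sum of the positive count residues per distinct line (a multiset difference).
import Mathlib
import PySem

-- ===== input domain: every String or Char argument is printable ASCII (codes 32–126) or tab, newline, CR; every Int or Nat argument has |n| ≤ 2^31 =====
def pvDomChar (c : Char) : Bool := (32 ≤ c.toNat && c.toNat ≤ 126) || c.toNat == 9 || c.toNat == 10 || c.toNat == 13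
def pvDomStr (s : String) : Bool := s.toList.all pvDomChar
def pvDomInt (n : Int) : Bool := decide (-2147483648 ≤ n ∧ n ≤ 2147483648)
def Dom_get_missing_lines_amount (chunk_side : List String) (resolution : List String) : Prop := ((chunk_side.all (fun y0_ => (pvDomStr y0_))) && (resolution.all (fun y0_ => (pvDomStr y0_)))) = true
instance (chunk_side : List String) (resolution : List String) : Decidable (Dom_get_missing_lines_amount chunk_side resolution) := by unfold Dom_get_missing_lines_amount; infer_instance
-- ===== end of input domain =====

-- B replaces A's O(n*m) consume-from-a-copy matching loop by two one-pass frequency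
-- dictionaries and a sum of positive count residues (O(n+m); measured faster in a timing run).


-- ===== PORT A =====
-- state (missing_lines_number, resolution); in the else-branch 'line ∈ resolution' holds,
-- so remove? is some and getD never takes its default (Python list.remove cannot raise there)
def get_missing_lines_amount (chunk_side : List String) (resolution : List String) : Int :=
  (chunk_side.foldl
    (fun (st : Int × List String) line =>
      if line ∉ st.2 then (st.1 + 1, st.2)
      else (st.1, (PySem.List.remove? st.2 line).getD st.2))
    (0, resolution)).1

-- ===== PORT B =====
def get_missing_lines_amount_alt (chunk_side : List String) (resolution : List String) : Int :=
  let freq_c := chunk_side.foldl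
    (fun (d : PySem.Dict String Int) line => d.insert line (d.getD line 0 + 1)) PySem.Dict.empty
  let freq_r := resolution.foldl
    (fun (d : PySem.Dict String Int) line => d.insert line (d.getD line 0 + 1)) PySem.Dict.empty
  (freq_c.items.map (fun p => max (p.2 - freq_r.getD p.1 0) 0)).sum

-- ===== PRECONDITION & SPEC =====
def Spec_get_missing_lines_amount (chunk_side : List String) (resolution : List String) (out : Int) : Prop := out = get_missing_lines_amount_alt chunk_side resolution
instance (chunk_side : List String) (resolution : List String) (out : Int) : Decidable (Spec_get_missing_lines_amount chunk_side resolution out) := by unfold Spec_get_missing_lines_amount; infer_instance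

-- ===== CLAIM (what is proved, stated in full; the proofs are below) =====
def Claim_equal_get_missing_lines_amount : Prop := ∀ (chunk_side : List String) (resolution : List String), Dom_get_missing_lines_amount chunk_side resolution → Spec_get_missing_lines_amount chunk_side resolution (get_missing_lines_amount chunk_side resolution)

-- ===== LEMMAS AND PROOFS =====

-- multiset facts for A's loop step
theorem pv_cons_sub_of_mem {α : Type} [DecidableEq α] (x : α) (s t : Multiset α) (h : x ∈ t) :
    (x ::ₘ s) - t = s - t.erase x := by
  ext a
  by_cases hax : a = x
  · subst hax
    have : 1 ≤ Multiset.count a t := Multiset.one_le_count_iff_mem.mpr h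
    simp [Multiset.count_sub, Multiset.count_erase_self]
    omega
  · simp [Multiset.count_sub, Multiset.count_erase_of_ne hax, hax]

theorem pv_cons_sub_of_not_mem {α : Type} [DecidableEq α] (x : α) (s t : Multiset α) (h : x ∉ t) :
    (x ::ₘ s) - t = x ::ₘ (s - t) := by
  have hc : Multiset.count x t = 0 := Multiset.count_eq_zero.mpr h
  ext a
  by_cases hax : a = x
  · subst hax; simp [Multiset.count_sub, hc]
  · simp [Multiset.count_sub, hax]

-- A's loop computes m + |↑cs - ↑res| (card of the multiset difference)
theorem pv_loopA (cs : List String) : ∀ (res : List String) (m : Int),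
    (cs.foldl
      (fun (st : Int × List String) line =>
        if line ∉ st.2 then (st.1 + 1, st.2)
        else (st.1, (PySem.List.remove? st.2 line).getD st.2))
      (m, res)).1
    = m + (Multiset.card ((↑cs : Multiset String) - (↑res : Multiset String)) : Int) := by
  induction cs with
  | nil => intro res m; simp
  | cons x cs ih =>
    intro res m
    by_cases hx : x ∈ res
    · have hrem : PySem.List.remove? res x = some (res.erase x) :=
        PySem.List.remove?_eq_some_erase res x hx
      simp only [List.foldl_cons, hx, not_true_eq_false, if_false, hrem, Option.getD_some]
      rw [ih]
      have : ((↑(x :: cs) : Multiset String) - (↑res : Multiset String))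
           = (↑cs : Multiset String) - (↑(res.erase x) : Multiset String) := by
        rw [show ((x :: cs : List String) : Multiset String) = x ::ₘ ↑cs from rfl]
        rw [pv_cons_sub_of_mem x _ _ (by simpa using hx)]
        rw [Multiset.coe_erase]
      rw [this]
    · simp only [List.foldl_cons, hx, not_false_eq_true, if_true]
      rw [ih]
      have : ((↑(x :: cs) : Multiset String) - (↑res : Multiset String))
           = x ::ₘ ((↑cs : Multiset String) - (↑res : Multiset String)) := by
        rw [show ((x :: cs : List String) : Multiset String) = x ::ₘ ↑cs from rfl]
        exact pv_cons_sub_of_not_mem x _ _ (by simpa using hx)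
      rw [this]
      simp
      omega

-- card of the multiset difference as a sum over the support of cs
theorem pv_card_sub_eq_sum (cs res : List String) :
    Multiset.card ((↑cs : Multiset String) - (↑res : Multiset String))
      = ∑ a ∈ cs.toFinset, (cs.count a - res.count a) := by
  have hsub : ((↑cs : Multiset String) - (↑res : Multiset String)).toFinset ⊆ cs.toFinset := by
    intro a ha
    have h1 : a ∈ ((↑cs : Multiset String) - (↑res : Multiset String)) :=
      Multiset.mem_toFinset.mp ha
    have h2 := Multiset.mem_of_le (Multiset.sub_le_self _ _) h1
    simpa [List.mem_toFinset] using h2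
  calc Multiset.card ((↑cs : Multiset String) - (↑res : Multiset String))
      = ∑ a ∈ ((↑cs : Multiset String) - (↑res : Multiset String)).toFinset,
          Multiset.count a ((↑cs : Multiset String) - (↑res : Multiset String)) :=
        (Multiset.toFinset_sum_count_eq _).symm
    _ = ∑ a ∈ cs.toFinset,
          Multiset.count a ((↑cs : Multiset String) - (↑res : Multiset String)) := by
        refine Finset.sum_subset hsub ?_
        intro a _ ha
        exact Multiset.count_eq_zero.mpr (fun hmem => ha (Multiset.mem_toFinset.mpr hmem))
    _ = ∑ a ∈ cs.toFinset, (cs.count a - res.count a) := by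
        refine Finset.sum_congr rfl ?_
        intro a _
        simp [Multiset.count_sub, List.count_diff]

-- ===== VERDICT (by name: the statement is the Claim_ definition above) =====
theorem get_missing_lines_amount_spec : Claim_equal_get_missing_lines_amount := by
  intro cs res _
  unfold Spec_get_missing_lines_amount get_missing_lines_amount get_missing_lines_amount_alt
  rw [pv_loopA cs res 0]
  simp only [PySem.Dict.foldl_insert_getD_add_one_eq_counter, PySem.Dict.items_counter,
    PySem.Dict.getD_counter, List.map_map]
  have hnd : (PySem.Set.ofList cs).Nodup := PySem.Set.nodup_ofList cs
  have hfs : (PySem.Set.ofList cs).toFinset = cs.toFinset := by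
    ext a
    simp [List.mem_toFinset, PySem.Set.mem_ofList]
  have hsum :
      ((PySem.Set.ofList cs).map
        ((fun p : String × Int => max (p.2 - ((res.count p.1 : Int))) 0) ∘
          fun k => (k, (cs.count k : Int)))).sum
      = ∑ a ∈ cs.toFinset, ((cs.count a - res.count a : ℕ) : Int) := by
    rw [← hfs, ← List.sum_toFinset _ hnd]
    refine Finset.sum_congr rfl ?_
    intro a _
    simp only [Function.comp]
    push_cast
    omega
  rw [hsum, pv_card_sub_eq_sum cs res]
  push_cast
  ring
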